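-- pv_equiv track=rewrite | github.com/gonzo120/PruebaTecnica_Globaltek | Ejercicio2.py | filtrar_lista
-- ===== SOURCE A (Python) =====
-- def filtrar_lista(lista):
--     salida = []
--     for numero in lista:
--         if numero > 1000:
--             break
--         if numero % 5 == 0 and numero <= 600:
--             salida.append(numero)
--     return salida
-- ===== SOURCE B (Python) =====
-- from functools import reduce
--
-- def filtrar_lista(lista):
--     # Right fold: an element > 1000 resets the accumulator, discarding
--     # everything to its right; so only the prefix before the first > 1000
--     # survives, filtered to multiples of 5 that are <= 600.
--     def paso(acc, numero):
--         if numero > 1000: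
--             return []
--         if numero % 5 == 0 and numero <= 600:
--             return [numero] + acc
--         return acc
--     return reduce(paso, reversed(lista), [])
-- ===== Notes on version B (the rewrite author's own statement) =====
-- stated objective: alternative
-- what changed: Replaces the forward loop-with-break-and-append by a right fold over the reversed list in which any element > 1000 resets the accumulator (discarding everything to its right), so no early exit or break is needed.
import Mathlib
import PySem

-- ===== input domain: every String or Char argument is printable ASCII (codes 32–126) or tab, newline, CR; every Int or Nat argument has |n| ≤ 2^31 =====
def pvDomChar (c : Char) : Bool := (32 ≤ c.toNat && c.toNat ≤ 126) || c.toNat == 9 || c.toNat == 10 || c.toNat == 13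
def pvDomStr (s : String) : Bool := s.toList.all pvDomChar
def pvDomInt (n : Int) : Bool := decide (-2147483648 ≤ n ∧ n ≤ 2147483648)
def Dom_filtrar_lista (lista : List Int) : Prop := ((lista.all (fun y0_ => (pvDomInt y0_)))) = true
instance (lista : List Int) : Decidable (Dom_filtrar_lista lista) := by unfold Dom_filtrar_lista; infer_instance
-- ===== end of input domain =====

-- B: right fold over the reversed list where an element > 1000 resets the accumulator, instead of A's forward loop with break (alternative decomposition).
-- ===== PORT A =====
def filtrar_lista (lista : List Int) : List Int :=
  match lista with
  | [] => []
  | numero :: rest =>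
    if numero > 1000 then []
    else if PySem.Int.mod numero 5 == 0 && numero ≤ 600 then
      numero :: filtrar_lista rest
    else filtrar_lista rest

-- ===== PORT B =====
-- reduce(paso, reversed(lista), []) = foldl over lista.reverse with the paso step
def filtrar_lista_paso (acc : List Int) (numero : Int) : List Int :=
  if numero > 1000 then []
  else if PySem.Int.mod numero 5 == 0 && numero ≤ 600 then numero :: acc
  else acc

def filtrar_lista_alt (lista : List Int) : List Int :=
  lista.reverse.foldl filtrar_lista_paso []

-- ===== PRECONDITION & SPEC =====
def Spec_filtrar_lista (lista : List Int) (out : List Int) : Prop := out = filtrar_lista_alt lista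
instance (lista : List Int) (out : List Int) : Decidable (Spec_filtrar_lista lista out) := by unfold Spec_filtrar_lista; infer_instance

-- ===== CLAIM (what is proved, stated in full; the proofs are below) =====
def Claim_equal_filtrar_lista : Prop := ∀ (lista : List Int), Dom_filtrar_lista lista → Spec_filtrar_lista lista (filtrar_lista lista)

-- ===== LEMMAS AND PROOFS =====
lemma filtrar_lista_alt_foldr (lista : List Int) :
    filtrar_lista_alt lista = lista.foldr (fun n acc => filtrar_lista_paso acc n) [] := by
  simp [filtrar_lista_alt, List.foldl_reverse]

lemma filtrar_lista_eq_alt (lista : List Int) :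
    filtrar_lista lista = filtrar_lista_alt lista := by
  induction lista with
  | nil => rfl
  | cons n rest ih =>
    rw [filtrar_lista_alt_foldr] at ih ⊢
    simp only [filtrar_lista, List.foldr_cons, filtrar_lista_paso, ih]

-- ===== VERDICT (by name: the statement is the Claim_ definition above) =====
theorem filtrar_lista_spec : Claim_equal_filtrar_lista :=
  fun lista _ => filtrar_lista_eq_alt lista
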